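-- pv_equiv track=rewrite | github.com/physiii/archivist | documents/extract.py | _normalize_pdf_text
-- ===== SOURCE A (Python) =====
-- def _normalize_pdf_text(value: str) -> str:
--     raw_lines = [line.strip() for line in str(value or "").replace("\r", "\n").split("\n")]
--     merged: list[str] = []
--     current = ""
--     for line in raw_lines:
--         if not line:
--             if current:
--                 merged.append(current.strip())
--                 current = ""
--             continue
--         if not current:
--             current = line
--             continue
--         if current.endswith((".", ":", ";", "?", "!")) or line[:1].isupper():
--             merged.append(current.strip())
--             current = line
--         else:
--             current = f"{current} {line}"
--     if current:
--         merged.append(current.strip())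
--     return "\n\n".join(item for item in merged if item).strip()
-- ===== SOURCE B (Python) =====
-- def _normalize_pdf_text(value: str) -> str:
--     lines = [line.strip() for line in str(value or "").replace("\r", "\n").split("\n")]
--     # split into blocks of consecutive non-blank lines
--     blocks: list[list[str]] = []
--     cur: list[str] = []
--     for line in lines:
--         if line:
--             cur.append(line)
--         elif cur:
--             blocks.append(cur)
--             cur = []
--     if cur:
--         blocks.append(cur)
--     # fold each block's lines into paragraphs
--     paragraphs: list[str] = []
--     for block in blocks:
--         para = block[0]
--         for line in block[1:]:
--             if para[-1] in ".:;?!" or line[0].isupper():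
--                 paragraphs.append(para)
--                 para = line
--             else:
--                 para = f"{para} {line}"
--         paragraphs.append(para)
--     return "\n\n".join(paragraphs).strip()
-- ===== Notes on version B (the rewrite author's own statement) =====
-- stated objective: alternative
-- what changed: Replaces A's single merge loop with blank-line flush state by a two-phase decomposition: first group the stripped lines into blocks of consecutive non-blank lines, then fold each block's lines into paragraphs; the blank-line/flush bookkeeping disappears from the paragraph fold.
import Mathlib
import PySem

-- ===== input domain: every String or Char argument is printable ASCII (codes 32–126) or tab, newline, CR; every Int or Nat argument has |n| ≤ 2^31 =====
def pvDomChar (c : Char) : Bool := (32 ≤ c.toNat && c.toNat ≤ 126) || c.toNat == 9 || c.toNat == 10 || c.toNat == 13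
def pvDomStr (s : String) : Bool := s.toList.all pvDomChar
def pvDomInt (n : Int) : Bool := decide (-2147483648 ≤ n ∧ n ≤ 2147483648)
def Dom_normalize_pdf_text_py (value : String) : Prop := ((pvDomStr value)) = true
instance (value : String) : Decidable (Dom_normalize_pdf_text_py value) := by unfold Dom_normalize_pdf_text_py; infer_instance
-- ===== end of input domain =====

-- B replaces A's single merge loop (blank-line flush state) with a two-phase decomposition:
-- group the stripped lines into blocks of consecutive non-blank lines, then fold each
-- block's lines into paragraphs (objective: alternative decomposition, same cost).

-- ===== PORT A =====

-- Python str.isupper() applied to the ≤1-char slices line[:1]; exact on those (ASCII domain)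
def pvSliceIsupper (cs : List Char) : Bool :=
  match cs with
  | [c] => PySem.Chars.isupper c
  | _ => false

-- A's break test: current.endswith((".", ":", ";", "?", "!")) or line[:1].isupper()
def pvBreakA (current line : List Char) : Bool :=
  (PySem.Chars.endswith current ['.'] || PySem.Chars.endswith current [':'] ||
   PySem.Chars.endswith current [';'] || PySem.Chars.endswith current ['?'] ||
   PySem.Chars.endswith current ['!']) || pvSliceIsupper (PySem.List.slice line none (some 1))

-- one iteration of A's for-loop over state (merged, current)
def pvStepA (st : List (List Char) × List Char) (line : List Char) : List (List Char) × List Char :=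
  if line = [] then
    if st.2 = [] then st else (st.1 ++ [PySem.Chars.strip st.2], [])
  else if st.2 = [] then (st.1, line)
  else if pvBreakA st.2 line then (st.1 ++ [PySem.Chars.strip st.2], line)
  else (st.1, st.2 ++ ' ' :: line)

def normalize_pdf_text_py (value : String) : String :=
  -- str(value or "") is the identity on a str argument
  let raw_lines := (PySem.Chars.splitOn (PySem.Chars.replace value.toList ['\r'] ['\n']) ['\n']).map PySem.Chars.strip
  let st := raw_lines.foldl pvStepA ([], [])
  let merged := if st.2 = [] then st.1 else st.1 ++ [PySem.Chars.strip st.2]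
  String.ofList (PySem.Chars.strip (PySem.Chars.join ['\n', '\n'] (merged.filter (fun item => !item.isEmpty))))

-- ===== PORT B =====

-- B's break test: para[-1] in ".:;?!" or line[0].isupper()
-- (para and line are never empty where B tests this; the none/[] fallbacks are unreachable)
def pvBreakB (para line : List Char) : Bool :=
  (match PySem.List.pyGet? para (-1) with
   | some c => PySem.Chars.isIn [c] ['.', ':', ';', '?', '!']
   | none => false)
  || (match line with
      | c :: _ => PySem.Chars.isupper c
      | [] => false)

-- one iteration of B's block-collecting loop over state (blocks, cur)
def pvStepBlock (st : List (List (List Char)) × List (List Char)) (line : List Char) :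
    List (List (List Char)) × List (List Char) :=
  if line ≠ [] then (st.1, st.2 ++ [line])
  else if st.2 ≠ [] then (st.1 ++ [st.2], [])
  else st

-- one iteration of B's inner paragraph loop over state (paragraphs, para)
def pvStepPara (st : List (List Char) × List Char) (line : List Char) : List (List Char) × List Char :=
  if pvBreakB st.2 line then (st.1 ++ [st.2], line) else (st.1, st.2 ++ ' ' :: line)

def normalize_pdf_text_py_alt (value : String) : String :=
  let lines := (PySem.Chars.splitOn (PySem.Chars.replace value.toList ['\r'] ['\n']) ['\n']).map PySem.Chars.strip
  let bt := lines.foldl pvStepBlock ([], [])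
  let blocks := if bt.2 ≠ [] then bt.1 ++ [bt.2] else bt.1
  let paragraphs := blocks.foldl (fun acc block =>
      match block with
      | [] => acc               -- unreachable: collected blocks are nonempty
      | p :: rest =>
        let st := rest.foldl pvStepPara (acc, p)
        st.1 ++ [st.2]) []
  String.ofList (PySem.Chars.strip (PySem.Chars.join ['\n', '\n'] paragraphs))

-- ===== PRECONDITION & SPEC =====
def Spec_normalize_pdf_text_py (value : String) (out : String) : Prop := out = normalize_pdf_text_py_alt value
instance (value : String) (out : String) : Decidable (Spec_normalize_pdf_text_py value out) := by unfold Spec_normalize_pdf_text_py; infer_instance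

-- ===== CLAIM (what is proved, stated in full; the proofs are below) =====
def Claim_equal_normalize_pdf_text_py : Prop := ∀ (value : String), Dom_normalize_pdf_text_py value → Spec_normalize_pdf_text_py value (normalize_pdf_text_py value)

-- ===== LEMMAS AND PROOFS =====

-- "no surrounding whitespace": the invariant every stripped line satisfies
def PvNS (cs : List Char) : Prop :=
  (∀ c, cs.head? = some c → PySem.Chars.isspace c = false) ∧
  (∀ c, cs.getLast? = some c → PySem.Chars.isspace c = false)

lemma pvGetLast?_cons {t : List Char} {a : Char} (h : t ≠ []) :
    (a :: t).getLast? = t.getLast? := by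
  cases t with
  | nil => simp at h
  | cons b s => simp [List.getLast?_cons_cons]

lemma pvDropWhile_head? {p : Char → Bool} {l : List Char} {c : Char}
    (h : (l.dropWhile p).head? = some c) : p c = false := by
  induction l with
  | nil => simp at h
  | cons a t ih =>
    by_cases hp : p a
    · exact ih (by simpa [List.dropWhile_cons, hp] using h)
    · simp [List.dropWhile_cons, hp] at h
      subst h; simpa using hp

lemma pvDropWhile_getLast? {p : Char → Bool} {l : List Char}
    (h : l.dropWhile p ≠ []) : (l.dropWhile p).getLast? = l.getLast? := by
  induction l with
  | nil => simp at h
  | cons a t ih =>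
    by_cases hp : p a
    · have ht : t.dropWhile p ≠ [] := by simpa [List.dropWhile_cons, hp] using h
      have htne : t ≠ [] := by rintro rfl; simp at ht
      simp only [List.dropWhile_cons, hp, if_pos]
      rw [ih ht, pvGetLast?_cons htne]
    · simp [List.dropWhile_cons, hp]

lemma pvDropWhile_eq_self {p : Char → Bool} {l : List Char}
    (h : ∀ c, l.head? = some c → p c = false) : l.dropWhile p = l := by
  cases l with
  | nil => rfl
  | cons a t => simp [List.dropWhile_cons, h a (by simp)]

lemma pvStrip_def (cs : List Char) : PySem.Chars.strip cs =
    ((cs.dropWhile PySem.Chars.isspace).reverse.dropWhile PySem.Chars.isspace).reverse := by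
  simp [PySem.Chars.strip, PySem.Chars.lstrip, PySem.Chars.rstrip]

lemma pvNS_strip (cs : List Char) : PvNS (PySem.Chars.strip cs) := by
  rw [pvStrip_def]
  constructor
  · intro c h
    rw [List.head?_reverse] at h
    by_cases hz : ((cs.dropWhile PySem.Chars.isspace).reverse.dropWhile PySem.Chars.isspace) = []
    · rw [hz] at h; simp at h
    · rw [pvDropWhile_getLast? hz, List.getLast?_reverse] at h
      exact pvDropWhile_head? h
  · intro c h
    rw [List.getLast?_reverse] at h
    exact pvDropWhile_head? h

lemma pvNS_strip_eq {cs : List Char} (h : PvNS cs) : PySem.Chars.strip cs = cs := by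
  rw [pvStrip_def]
  rw [pvDropWhile_eq_self h.1]
  rw [pvDropWhile_eq_self (fun c hc => h.2 c (by rwa [List.head?_reverse] at hc))]
  simp

lemma pvNS_append {c l : List Char} (hc : PvNS c) (hl : PvNS l) (hc0 : c ≠ []) (hl0 : l ≠ []) :
    PvNS (c ++ ' ' :: l) := by
  constructor
  · intro x h
    rw [List.head?_append] at h
    cases hcx : c.head? with
    | none => exact absurd (List.head?_eq_none_iff.mp hcx) hc0
    | some y => rw [hcx] at h; simp at h; exact h ▸ hc.1 y hcx
  · intro x h
    rw [List.getLast?_append] at h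
    have h2 : (' ' :: l).getLast? = l.getLast? := pvGetLast?_cons hl0
    rw [h2] at h
    cases hlx : l.getLast? with
    | none => exact absurd (List.getLast?_eq_none_iff.mp hlx) hl0
    | some y => rw [hlx] at h; simp at h; exact h ▸ hl.2 y hlx

lemma pvEndswith_concat (c' : List Char) (x a : Char) :
    PySem.Chars.endswith (c' ++ [x]) [a] = (x == a) := by
  simp [PySem.Chars.endswith, List.isSuffixOf, List.isPrefixOf]
  exact eq_comm

lemma pvIsIn_singleton (x : Char) (s : List Char) :
    PySem.Chars.isIn [x] s = s.contains x := by
  rw [Bool.eq_iff_iff, PySem.Chars.isIn_iff_infix, List.contains_iff_mem]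
  exact List.singleton_infix_iff x s

-- the two break tests agree whenever both strings are nonempty
lemma pvBreak_eq {c l : List Char} (hc : c ≠ []) (hl : l ≠ []) : pvBreakA c l = pvBreakB c l := by
  obtain ⟨c', x, rfl⟩ := List.eq_nil_or_concat c |>.resolve_left hc
  obtain ⟨y, l', rfl⟩ := List.exists_cons_of_ne_nil hl
  simp only [List.concat_eq_append]
  have hg : PySem.List.pyGet? (c' ++ [x]) (-1) = some x := by
    simp [PySem.List.pyGet?, PySem.List.pyIdx?]
  have hs : PySem.List.slice (y :: l') none (some 1) = [y] := by
    rw [PySem.List.slice_to (y :: l') (by norm_num)]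
    simp
  unfold pvBreakA pvBreakB
  rw [hg, hs]
  simp only [pvEndswith_concat, pvIsIn_singleton, pvSliceIsupper]
  congr 1
  simp [beq_eq_decide, Bool.or_assoc]

-- is a line non-blank
def pvNB (l : List Char) : Bool := !l.isEmpty

-- fold one block's lines into paragraphs (reference form of B's inner loop)
def pvParaFold (p : List Char) : List (List Char) → List (List Char)
  | [] => [p]
  | l :: t => if pvBreakB p l then p :: pvParaFold l t else pvParaFold (p ++ ' ' :: l) t

-- the whole paragraph list, by recursion on the line list (blocks consumed via takeWhile/dropWhile)
def pvG : List (List Char) → List (List Char)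
  | [] => []
  | l :: t =>
    if l = [] then pvG t
    else pvParaFold l (t.takeWhile pvNB) ++ pvG (t.dropWhile pvNB)
termination_by ls => ls.length
decreasing_by
  · simp
  · have := List.length_dropWhile_le pvNB t; simp; omega

-- the block list, by the same recursion
def pvBlocks : List (List Char) → List (List (List Char))
  | [] => []
  | l :: t =>
    if l = [] then pvBlocks t
    else (l :: t.takeWhile pvNB) :: pvBlocks (t.dropWhile pvNB)
termination_by ls => ls.length
decreasing_by
  · simp
  · have := List.length_dropWhile_le pvNB t; simp; omega

def pvParaOf (block : List (List Char)) : List (List Char) :=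
  match block with
  | [] => []
  | p :: rest => pvParaFold p rest

-- B's block-collecting loop computes pvBlocks
lemma pvB_blocks (lines : List (List Char)) (bs : List (List (List Char))) (cur : List (List Char)) :
    (let st := lines.foldl pvStepBlock (bs, cur)
     if st.2 ≠ [] then st.1 ++ [st.2] else st.1)
    = bs ++ (if cur = [] then pvBlocks lines
             else (cur ++ lines.takeWhile pvNB) :: pvBlocks (lines.dropWhile pvNB)) := by
  induction lines generalizing bs cur with
  | nil =>
    by_cases hc : cur = [] <;> simp [hc, pvBlocks]
  | cons l t ih =>
    by_cases hl : l = []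
    · subst hl
      by_cases hc : cur = []
      · subst hc
        simpa [pvStepBlock, pvBlocks] using ih bs []
      · have : pvStepBlock (bs, cur) [] = (bs ++ [cur], []) := by simp [pvStepBlock, hc]
        simp only [List.foldl_cons, this]
        rw [ih (bs ++ [cur]) []]
        simp [hc, pvBlocks, pvNB, List.takeWhile, List.dropWhile]
    · have hst : ∀ (b : List (List (List Char))) (c : List (List Char)),
          pvStepBlock (b, c) l = (b, c ++ [l]) := by intro b c; simp [pvStepBlock, hl]
      have htk : (l :: t).takeWhile pvNB = l :: t.takeWhile pvNB := by
        simp [List.takeWhile_cons, pvNB, hl]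
      have hdr : (l :: t).dropWhile pvNB = t.dropWhile pvNB := by
        simp [List.dropWhile_cons, pvNB, hl]
      by_cases hc : cur = []
      · subst hc
        simp only [List.foldl_cons, hst, List.nil_append]
        rw [ih bs [l]]
        simp [pvBlocks, hl, htk, hdr]
      · simp only [List.foldl_cons, hst]
        rw [ih bs (cur ++ [l])]
        simp [hc, htk, hdr]

-- B's inner paragraph loop computes pvParaFold
lemma pvB_para_inner (rest : List (List Char)) (acc : List (List Char)) (p : List Char) :
    (let st := rest.foldl pvStepPara (acc, p); st.1 ++ [st.2]) = acc ++ pvParaFold p rest := by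
  induction rest generalizing acc p with
  | nil => simp [pvParaFold]
  | cons l t ih =>
    by_cases hb : pvBreakB p l
    · simp only [List.foldl_cons, pvStepPara, hb, if_pos]
      rw [ih (acc ++ [p]) l]
      simp [pvParaFold, hb]
    · simp only [List.foldl_cons, pvStepPara, hb, if_neg, Bool.false_eq_true, not_false_iff]
      rw [ih acc (p ++ ' ' :: l)]
      simp [pvParaFold, hb]

-- B's outer paragraph loop flat-maps pvParaOf over the blocks
lemma pvB_para_outer (blocks : List (List (List Char))) (acc : List (List Char)) :
    blocks.foldl (fun acc block =>
      match block with
      | [] => acc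
      | p :: rest =>
        let st := rest.foldl pvStepPara (acc, p)
        st.1 ++ [st.2]) acc
    = acc ++ blocks.flatMap pvParaOf := by
  induction blocks generalizing acc with
  | nil => simp
  | cons b bs ih =>
    cases b with
    | nil => simp only [List.foldl_cons]; rw [ih acc]; simp [pvParaOf]
    | cons p rest =>
      simp only [List.foldl_cons]
      rw [pvB_para_inner rest acc p, ih]
      simp [pvParaOf]

lemma pvG_eq_blocks (lines : List (List Char)) :
    pvG lines = (pvBlocks lines).flatMap pvParaOf := by
  induction lines using pvG.induct with
  | case1 => simp [pvG, pvBlocks]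
  | case2 t ih => rw [pvG, pvBlocks]; simp [ih]
  | case3 l t hl ih => rw [pvG, pvBlocks]; simp [hl, ih, pvParaOf]

lemma pvParaFold_ne {p : List Char} {t : List (List Char)} (hp : p ≠ [])
    (ht : ∀ l ∈ t, l ≠ []) : ∀ x ∈ pvParaFold p t, x ≠ [] := by
  induction t generalizing p with
  | nil => simpa [pvParaFold] using hp
  | cons l t ih =>
    have hl : l ≠ [] := ht l (by simp)
    have ht' : ∀ x ∈ t, x ≠ [] := fun x hx => ht x (by simp [hx])
    by_cases hb : pvBreakB p l
    · simp only [pvParaFold, hb, if_pos]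
      intro x hx
      rcases List.mem_cons.mp hx with rfl | hx
      · exact hp
      · exact ih hl ht' x hx
    · simp only [pvParaFold, hb, if_neg, Bool.false_eq_true, not_false_iff]
      exact ih (by simp) ht'

lemma pvG_ne (lines : List (List Char)) : ∀ x ∈ pvG lines, x ≠ [] := by
  induction lines using pvG.induct with
  | case1 => simp [pvG]
  | case2 t ih => rw [pvG]; simpa using ih
  | case3 l t hl ih =>
    rw [pvG]
    simp only [hl, if_neg]
    intro x hx
    rcases List.mem_append.mp hx with hx | hx
    · exact pvParaFold_ne hl (fun y hy => by
        have := List.mem_takeWhile_imp hy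
        simpa [pvNB] using this) x hx
    · exact ih x hx

-- A's loop computes pvG
lemma pvA_loop (lines : List (List Char)) (m : List (List Char)) (c : List Char)
    (hl : ∀ l ∈ lines, PvNS l) (hc : PvNS c) :
    (let st := lines.foldl pvStepA (m, c)
     if st.2 = [] then st.1 else st.1 ++ [PySem.Chars.strip st.2])
    = m ++ (if c = [] then pvG lines
            else pvParaFold c (lines.takeWhile pvNB) ++ pvG (lines.dropWhile pvNB)) := by
  induction lines generalizing m c with
  | nil =>
    by_cases hcn : c = []
    · simp [hcn, pvG]
    · simp [hcn, pvParaFold, pvNS_strip_eq hc, pvG]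
  | cons l t ih =>
    have hl' : ∀ x ∈ t, PvNS x := fun x hx => hl x (by simp [hx])
    by_cases hln : l = []
    · subst hln
      by_cases hcn : c = []
      · subst hcn
        have : pvStepA (m, []) [] = (m, []) := by simp [pvStepA]
        simp only [List.foldl_cons, this]
        rw [ih m [] hl' ⟨by simp, by simp⟩]
        simp [pvG]
      · have : pvStepA (m, c) [] = (m ++ [PySem.Chars.strip c], []) := by simp [pvStepA, hcn]
        simp only [List.foldl_cons, this]
        rw [ih (m ++ [PySem.Chars.strip c]) [] hl' ⟨by simp, by simp⟩]
        simp [hcn, pvNS_strip_eq hc, pvG, pvParaFold, pvNB]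
    · have hNSl : PvNS l := hl l (by simp)
      have htk : (l :: t).takeWhile pvNB = l :: t.takeWhile pvNB := by
        simp [List.takeWhile_cons, pvNB, hln]
      have hdr : (l :: t).dropWhile pvNB = t.dropWhile pvNB := by
        simp [List.dropWhile_cons, pvNB, hln]
      by_cases hcn : c = []
      · subst hcn
        have : pvStepA (m, []) l = (m, l) := by simp [pvStepA, hln]
        simp only [List.foldl_cons, this]
        rw [ih m l hl' hNSl]
        simp [pvG, hln]
      · by_cases hb : pvBreakA c l
        · have : pvStepA (m, c) l = (m ++ [PySem.Chars.strip c], l) := by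
            simp [pvStepA, hln, hcn, hb]
          simp only [List.foldl_cons, this]
          rw [ih (m ++ [PySem.Chars.strip c]) l hl' hNSl]
          have hbB : pvBreakB c l = true := by rw [← pvBreak_eq hcn hln]; exact hb
          simp [hcn, hln, pvNS_strip_eq hc, htk, hdr, pvParaFold, hbB]
        · have : pvStepA (m, c) l = (m, c ++ ' ' :: l) := by
            simp [pvStepA, hln, hcn, hb]
          simp only [List.foldl_cons, this]
          rw [ih m (c ++ ' ' :: l) hl' (pvNS_append hc hNSl hcn hln)]
          have hbB : pvBreakB c l = false := by rw [← pvBreak_eq hcn hln]; simpa using hb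
          simp [hcn, htk, hdr, pvParaFold, hbB]

-- ===== VERDICT (by name: the statement is the Claim_ definition above) =====
theorem normalize_pdf_text_py_spec : Claim_equal_normalize_pdf_text_py := by
  intro value _
  unfold Spec_normalize_pdf_text_py normalize_pdf_text_py normalize_pdf_text_py_alt
  set lines := (PySem.Chars.splitOn (PySem.Chars.replace value.toList ['\r'] ['\n']) ['\n']).map PySem.Chars.strip with hlines
  have hNS : ∀ l ∈ lines, PvNS l := by
    intro l hlm
    rw [hlines] at hlm
    obtain ⟨x, -, rfl⟩ := List.mem_map.mp hlm
    exact pvNS_strip x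
  have hA := pvA_loop lines [] [] hNS ⟨by simp, by simp⟩
  simp only [if_true, List.nil_append] at hA
  have hB1 := pvB_blocks lines [] []
  simp only [if_true, List.nil_append] at hB1
  have hB2 := pvB_para_outer (pvBlocks lines) []
  simp only [List.nil_append] at hB2
  have hfilter : (pvG lines).filter (fun item => !item.isEmpty) = pvG lines := by
    refine List.filter_eq_self.mpr (fun x hx => ?_)
    have := pvG_ne lines x hx
    simpa [List.isEmpty_iff] using this
  simp only [hA, hB1, hB2, ← pvG_eq_blocks, hfilter]
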